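-- pv_equiv track=rewrite | github.com/Nany033/Desarrollo-de-aplicaciones-avanzadas | Red_neuronal.py | hopfield_train
-- ===== SOURCE A (Python) =====
-- def outer_product(vec):
--     n = len(vec)
--     M = [[0 for _ in range(n)] for _ in range(n)]
--     for i in range(n):
--         for j in range(n):
--             M[i][j] = vec[i] * vec[j]
--     return M
--
-- def add_matrices(A, B):
--     n = len(A)
--     M = [[0 for _ in range(n)] for _ in range(n)]
--     for i in range(n):
--         for j in range(n):
--             M[i][j] = A[i][j] + B[i][j]
--     return M
--
-- def zero_diagonal(M):
--     n = len(M)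
--     for i in range(n):
--         M[i][i] = 0
--     return M
--
-- def hopfield_train(patterns):
--     n = len(patterns[0])
--     W = [[0 for _ in range(n)] for _ in range(n)]
--     for p in patterns:
--         M = outer_product(p)
--         W = add_matrices(W, M)
--     W = zero_diagonal(W)
--     return W
-- ===== SOURCE B (Python) =====
-- def hopfield_train(patterns):
--     n = len(patterns[0])
--     return [[0 if i == j else sum(p[i] * p[j] for p in patterns) for j in range(n)]
--             for i in range(n)]
-- ===== Notes on version B (the rewrite author's own statement) =====
-- stated objective: simpler
-- what changed: Replaces the three matrix helpers and the per-pattern accumulation of whole matrices by a single nested comprehension computing each cell directly (0 on the diagonal, else the sum of p[i]*p[j] over patterns), so no intermediate matrices are allocated.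
import Mathlib
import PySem

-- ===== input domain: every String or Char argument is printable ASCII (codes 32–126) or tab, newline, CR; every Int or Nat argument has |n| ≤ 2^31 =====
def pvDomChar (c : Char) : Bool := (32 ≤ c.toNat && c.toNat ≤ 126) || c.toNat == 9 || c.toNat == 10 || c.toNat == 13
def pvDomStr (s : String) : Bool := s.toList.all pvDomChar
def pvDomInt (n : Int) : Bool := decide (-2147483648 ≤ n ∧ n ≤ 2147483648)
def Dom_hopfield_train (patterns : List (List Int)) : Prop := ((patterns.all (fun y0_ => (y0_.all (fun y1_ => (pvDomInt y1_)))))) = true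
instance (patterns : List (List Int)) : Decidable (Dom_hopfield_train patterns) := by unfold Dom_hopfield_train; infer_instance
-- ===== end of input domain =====

-- B computes each Hopfield weight cell directly (0 on the diagonal, else the sum of
-- p[i]*p[j] over the patterns) instead of accumulating whole intermediate matrices: simpler.


-- ===== PORT A =====
-- outer_product: n×n matrix of vec[i]*vec[j]
def pvOuterProduct (vec : List Int) : List (List Int) :=
  let n := vec.length
  (List.range n).map (fun i => (List.range n).map (fun j => vec.getD i 0 * vec.getD j 0))

-- add_matrices: entrywise sum, size taken from A
def pvAddMatrices (A B : List (List Int)) : List (List Int) :=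
  let n := A.length
  (List.range n).map (fun i => (List.range n).map (fun j =>
    (A.getD i []).getD j 0 + (B.getD i []).getD j 0))

-- zero_diagonal: set M[i][i] = 0, keep other cells
def pvZeroDiagonal (M : List (List Int)) : List (List Int) :=
  (List.range M.length).map (fun i =>
    let row := M.getD i []
    (List.range row.length).map (fun j => if j = i then 0 else row.getD j 0))

def hopfield_train (patterns : List (List Int)) : List (List Int) :=
  let n := (patterns.getD 0 []).length
  let W0 := (List.range n).map (fun _ => (List.range n).map (fun _ => (0 : Int)))
  let W := patterns.foldl (fun W p => pvAddMatrices W (pvOuterProduct p)) W0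
  pvZeroDiagonal W

-- ===== PORT B =====
def hopfield_train_alt (patterns : List (List Int)) : List (List Int) :=
  let n := (patterns.getD 0 []).length
  (List.range n).map (fun i => (List.range n).map (fun j =>
    if i = j then 0 else (patterns.map (fun p => p.getD i 0 * p.getD j 0)).sum))

-- ===== PRECONDITION & SPEC =====
-- Pre_ excludes exactly the inputs where A raises IndexError: empty patterns (patterns[0])
-- and a pattern shorter than patterns[0] (indexing in add_matrices).
def Pre_hopfield_train (patterns : List (List Int)) : Prop :=
  patterns ≠ [] ∧ ∀ p ∈ patterns, (patterns.getD 0 []).length ≤ p.length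
instance (patterns : List (List Int)) : Decidable (Pre_hopfield_train patterns) := by
  unfold Pre_hopfield_train; infer_instance
def pvWitness_hopfield_train : List (List Int) := [[1, -1], [-1, 1]]

def Spec_hopfield_train (patterns : List (List Int)) (out : List (List Int)) : Prop := out = hopfield_train_alt patterns
instance (patterns : List (List Int)) (out : List (List Int)) : Decidable (Spec_hopfield_train patterns out) := by unfold Spec_hopfield_train; infer_instance

-- ===== CLAIM (what is proved, stated in full; the proofs are below) =====
def Claim_equal_hopfield_train : Prop := ∀ (patterns : List (List Int)), Dom_hopfield_train patterns → Pre_hopfield_train patterns → Spec_hopfield_train patterns (hopfield_train patterns)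

-- ===== LEMMAS AND PROOFS =====

-- shorthand used only in the proofs: an n×n matrix given by a cell function
def pvMat (n : Nat) (f : Nat → Nat → Int) : List (List Int) :=
  (List.range n).map (fun i => (List.range n).map (fun j => f i j))

theorem pvMat_getD {n i : Nat} (f : Nat → Nat → Int) (hi : i < n) :
    (pvMat n f).getD i [] = (List.range n).map (fun j => f i j) := by
  simp [pvMat, List.getD, hi]

theorem pvMat_length (n : Nat) (f : Nat → Nat → Int) : (pvMat n f).length = n := by
  simp [pvMat]

theorem pvAdd_outer (n : Nat) (f : Nat → Nat → Int) (p : List Int) (hp : n ≤ p.length) :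
    pvAddMatrices (pvMat n f) (pvOuterProduct p) =
      pvMat n (fun i j => f i j + p.getD i 0 * p.getD j 0) := by
  unfold pvAddMatrices
  rw [pvMat_length]
  conv_rhs => rw [pvMat]
  apply List.map_congr_left
  intro i hi
  rw [List.mem_range] at hi
  have hi' : i < p.length := lt_of_lt_of_le hi hp
  have ho : (pvOuterProduct p).getD i [] = (List.range p.length).map (fun j => p.getD i 0 * p.getD j 0) := by
    show (pvMat p.length (fun i j => p.getD i 0 * p.getD j 0)).getD i [] = _
    exact pvMat_getD _ hi'
  rw [pvMat_getD f hi, ho]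
  apply List.map_congr_left
  intro j hj
  rw [List.mem_range] at hj
  have hj' : j < p.length := lt_of_lt_of_le hj hp
  simp [List.getD, hj, hj']

theorem pvFold_inv (n : Nat) (ps : List (List Int)) (f : Nat → Nat → Int)
    (hps : ∀ p ∈ ps, n ≤ p.length) :
    ps.foldl (fun W p => pvAddMatrices W (pvOuterProduct p)) (pvMat n f) =
      pvMat n (fun i j => f i j + ((ps.map (fun p => p.getD i 0 * p.getD j 0)).sum)) := by
  induction ps generalizing f with
  | nil => simp [pvMat]
  | cons p ps ih =>
      simp only [List.foldl_cons]
      rw [pvAdd_outer n f p (hps p (List.mem_cons_self ..)),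
          ih _ (fun q hq => hps q (List.mem_cons_of_mem _ hq))]
      simp [pvMat, add_assoc]

theorem pvZero_mat (n : Nat) (f : Nat → Nat → Int) :
    pvZeroDiagonal (pvMat n f) = pvMat n (fun i j => if j = i then 0 else f i j) := by
  unfold pvZeroDiagonal
  rw [pvMat_length]
  conv_rhs => rw [pvMat]
  apply List.map_congr_left
  intro i hi
  rw [List.mem_range] at hi
  rw [pvMat_getD f hi]
  simp only [List.length_map, List.length_range]
  apply List.map_congr_left
  intro j hj
  rw [List.mem_range] at hj
  simp [List.getD, hj]

-- ===== VERDICT (by name: the statement is the Claim_ definition above) =====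
theorem hopfield_train_spec : Claim_equal_hopfield_train := by
  intro patterns _ hpre
  obtain ⟨_, hlen⟩ := hpre
  unfold Spec_hopfield_train hopfield_train hopfield_train_alt
  simp only []
  set n := (patterns.getD 0 []).length with hn
  have h0 : (List.range n).map (fun _ => (List.range n).map (fun _ => (0 : Int))) =
      pvMat n (fun _ _ => 0) := rfl
  rw [h0, pvFold_inv n patterns _ hlen, pvZero_mat]
  unfold pvMat
  apply List.map_congr_left
  intro i hi
  apply List.map_congr_left
  intro j hj
  by_cases h : i = j <;> simp [h, eq_comm]
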